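-- pv_equiv track=rewrite | github.com/pypi-data/pypi-mirror-402 | packages/aisentry/aisentry-1.0.0.tar.gz/aisentry-1.0.0/src/aisentry/scorers/data_privacy_scorer.py | _score_consent_management_comprehensive
-- ===== SOURCE A (Python) =====
-- from typing import Any, Dict, List
--
-- def _score_consent_management_comprehensive(parsed_data: Dict[str, Any]) -> int:
--     """
--     Score comprehensive Consent Management (0-100) - Evidence-Based
--
--     Uses AST-based function detection for consent management endpoints.
--     Consent management tracks user permissions for data processing.
--
--     Scoring based on consent management features:
--     - Tracking + Opt-in + Withdrawal + Granular: 100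
--     - Tracking + Opt-in + Withdrawal: 75
--     - Tracking + Opt-in: 60
--     - Basic opt-in only: 40
--     - None detected: 0
--     """
--     # Consent management is primarily about endpoints/functions
--     function_defs = parsed_data.get('function_defs', [])
--     function_names = [f.lower() for f in function_defs]
--
--     # Consent tracking functions
--     tracking_patterns = [
--         'track_consent', 'store_consent', 'save_consent', 'consent_record',
--         'log_consent', 'update_consent'
--     ]
--     has_tracking = any(
--         any(pattern in func for pattern in tracking_patterns)
--         for func in function_names
--     )
--
--     # Opt-in/opt-out functions
--     opt_patterns = [
--         'opt_in', 'opt_out', 'give_consent', 'withdraw_consent',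
--         'accept_terms', 'decline_terms'
--     ]
--     has_opt = any(
--         any(pattern in func for pattern in opt_patterns)
--         for func in function_names
--     )
--
--     # Withdrawal functions
--     withdrawal_patterns = [
--         'withdraw_consent', 'revoke_consent', 'remove_consent',
--         'cancel_consent', 'delete_consent'
--     ]
--     has_withdrawal = any(
--         any(pattern in func for pattern in withdrawal_patterns)
--         for func in function_names
--     )
--
--     # Granular control functions
--     granular_patterns = [
--         'granular_consent', 'consent_preference', 'permission_level',
--         'consent_scope', 'specific_consent'
--     ]
--     has_granular = any(
--         any(pattern in func for pattern in granular_patterns)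
--         for func in function_names
--     )
--
--     # Score based on features
--     if has_tracking and has_opt and has_withdrawal and has_granular:
--         return 100
--     elif has_tracking and has_opt and has_withdrawal:
--         return 75
--     elif has_tracking and has_opt:
--         return 60
--     elif has_opt:
--         return 40
--     else:
--         return 0
-- ===== SOURCE B (Python) =====
-- # B: pattern-major scan building a 4-bit feature mask, scored by table lookup.
-- _TRACKING = ['track_consent', 'store_consent', 'save_consent', 'consent_record',
--              'log_consent', 'update_consent']
-- _OPT = ['opt_in', 'opt_out', 'give_consent', 'withdraw_consent',
--         'accept_terms', 'decline_terms']
-- _WITHDRAWAL = ['withdraw_consent', 'revoke_consent', 'remove_consent',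
--                'cancel_consent', 'delete_consent']
-- _GRANULAR = ['granular_consent', 'consent_preference', 'permission_level',
--              'consent_scope', 'specific_consent']
--
-- # one flat list tagging each pattern with its feature bit
-- _TAGGED = ([(p, 1) for p in _TRACKING] + [(p, 2) for p in _OPT] +
--            [(p, 4) for p in _WITHDRAWAL] + [(p, 8) for p in _GRANULAR])
--
-- # score indexed by feature mask (bit1 tracking, bit2 opt, bit4 withdrawal, bit8 granular)
-- _SCORE_TABLE = [0, 0, 40, 60, 0, 0, 40, 75, 0, 0, 40, 60, 0, 0, 40, 100]
--
-- def _score_consent_management_comprehensive(parsed_data):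
--     names = [f.lower() for f in parsed_data.get('function_defs', [])]
--     mask = 0
--     for pattern, bit in _TAGGED:
--         if any(pattern in n for n in names):
--             mask |= bit
--     return _SCORE_TABLE[mask]
-- ===== Notes on version B (the rewrite author's own statement) =====
-- stated objective: alternative
-- what changed: Inverts the scan to pattern-major over one flat tagged pattern list, accumulating a 4-bit feature bitmask, and replaces the if/elif scoring cascade with a 16-entry score table indexed by the mask.
import Mathlib
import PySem

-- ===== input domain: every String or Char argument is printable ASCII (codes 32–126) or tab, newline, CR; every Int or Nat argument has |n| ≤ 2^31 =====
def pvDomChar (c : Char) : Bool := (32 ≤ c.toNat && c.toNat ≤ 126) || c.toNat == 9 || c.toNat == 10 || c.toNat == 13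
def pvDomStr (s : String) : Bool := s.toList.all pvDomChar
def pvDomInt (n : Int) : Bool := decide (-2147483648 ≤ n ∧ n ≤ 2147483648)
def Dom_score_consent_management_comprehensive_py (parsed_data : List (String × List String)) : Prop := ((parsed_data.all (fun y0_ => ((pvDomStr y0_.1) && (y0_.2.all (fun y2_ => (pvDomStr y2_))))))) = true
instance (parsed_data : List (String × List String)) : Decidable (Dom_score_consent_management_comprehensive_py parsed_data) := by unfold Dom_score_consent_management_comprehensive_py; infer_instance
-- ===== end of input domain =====

-- B inverts the scan to pattern-major with a tagged pattern list and a 4-bit mask scored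
-- by a 16-entry table, instead of A's four name-major any-scans and the if/elif cascade.

-- ===== PORT A =====
def trackingPatterns : List String :=
  ["track_consent", "store_consent", "save_consent", "consent_record",
   "log_consent", "update_consent"]
def optPatterns : List String :=
  ["opt_in", "opt_out", "give_consent", "withdraw_consent",
   "accept_terms", "decline_terms"]
def withdrawalPatterns : List String :=
  ["withdraw_consent", "revoke_consent", "remove_consent",
   "cancel_consent", "delete_consent"]
def granularPatterns : List String :=
  ["granular_consent", "consent_preference", "permission_level",
   "consent_scope", "specific_consent"]

def score_consent_management_comprehensive_py (parsed_data : List (String × List String)) : Int :=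
  let function_defs := (PySem.Dict.mk parsed_data).getD "function_defs" []
  let function_names := function_defs.map (fun f => PySem.Str.lower f)
  let has_tracking := function_names.any (fun func => trackingPatterns.any (fun p => PySem.Str.isIn p func))
  let has_opt := function_names.any (fun func => optPatterns.any (fun p => PySem.Str.isIn p func))
  let has_withdrawal := function_names.any (fun func => withdrawalPatterns.any (fun p => PySem.Str.isIn p func))
  let has_granular := function_names.any (fun func => granularPatterns.any (fun p => PySem.Str.isIn p func))
  if has_tracking && has_opt && has_withdrawal && has_granular then 100
  else if has_tracking && has_opt && has_withdrawal then 75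
  else if has_tracking && has_opt then 60
  else if has_opt then 40
  else 0

-- ===== PORT B =====
def taggedPatterns : List (String × Nat) :=
  trackingPatterns.map (fun p => (p, 1)) ++ optPatterns.map (fun p => (p, 2)) ++
  withdrawalPatterns.map (fun p => (p, 4)) ++ granularPatterns.map (fun p => (p, 8))

def scoreTable : List Int := [0, 0, 40, 60, 0, 0, 40, 75, 0, 0, 40, 60, 0, 0, 40, 100]

def score_consent_management_comprehensive_py_alt (parsed_data : List (String × List String)) : Int :=
  let names := ((PySem.Dict.mk parsed_data).getD "function_defs" []).map (fun f => PySem.Str.lower f)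
  let mask := taggedPatterns.foldl
    (fun m pb => if names.any (fun n => PySem.Str.isIn pb.1 n) then m ||| pb.2 else m) 0
  (PySem.List.pyGet? scoreTable (Int.ofNat mask)).getD 0

-- ===== PRECONDITION & SPEC =====
def Spec_score_consent_management_comprehensive_py (parsed_data : List (String × List String)) (out : Int) : Prop := out = score_consent_management_comprehensive_py_alt parsed_data
instance (parsed_data : List (String × List String)) (out : Int) : Decidable (Spec_score_consent_management_comprehensive_py parsed_data out) := by unfold Spec_score_consent_management_comprehensive_py; infer_instance

-- ===== CLAIM (what is proved, stated in full; the proofs are below) =====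
def Claim_equal_score_consent_management_comprehensive_py : Prop := ∀ (parsed_data : List (String × List String)), Dom_score_consent_management_comprehensive_py parsed_data → Spec_score_consent_management_comprehensive_py parsed_data (score_consent_management_comprehensive_py parsed_data)

-- ===== LEMMAS AND PROOFS =====
-- folding a same-bit tagged segment ORs in its bit iff some pattern matches
theorem foldl_tagged_segment (names : List String) (ps : List String) (b : Nat) (m : Nat) :
    (ps.map (fun p => (p, b))).foldl
      (fun m pb => if names.any (fun n => PySem.Str.isIn pb.1 n) then m ||| pb.2 else m) m
    = m ||| (if ps.any (fun p => names.any (fun n => PySem.Str.isIn p n)) then b else 0) := by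
  induction ps generalizing m with
  | nil => simp
  | cons p ps ih =>
    simp only [List.map_cons, List.foldl_cons, List.any_cons]
    rw [ih]
    rcases Bool.eq_false_or_eq_true (names.any fun n => PySem.Str.isIn p n) with h | h <;>
      rcases Bool.eq_false_or_eq_true (ps.any fun p => names.any fun n => PySem.Str.isIn p n) with h2 | h2 <;>
        (simp only [h, h2]; simp)

-- swapping the two 'any' quantifiers
theorem any_swap {α β : Type} (l1 : List α) (l2 : List β) (f : α → β → Bool) :
    (l1.any fun a => l2.any fun b => f a b) = (l2.any fun b => l1.any fun a => f a b) := by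
  rw [Bool.eq_iff_iff]
  simp only [List.any_eq_true]
  tauto

-- the cascade equals the table lookup at the mask
theorem cascade_eq_table (t o w g : Bool) :
    (if t && o && w && g then (100 : Int)
     else if t && o && w then 75
     else if t && o then 60
     else if o then 40
     else 0)
    = (PySem.List.pyGet? scoreTable (Int.ofNat
        (0 ||| (if t then 1 else 0) ||| (if o then 2 else 0)
           ||| (if w then 4 else 0) ||| (if g then 8 else 0)))).getD 0 := by
  cases t <;> cases o <;> cases w <;> cases g <;> decide

-- ===== VERDICT (by name: the statement is the Claim_ definition above) =====
theorem score_consent_management_comprehensive_py_spec : Claim_equal_score_consent_management_comprehensive_py := by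
  intro pd _
  unfold Spec_score_consent_management_comprehensive_py
  unfold score_consent_management_comprehensive_py score_consent_management_comprehensive_py_alt
  simp only [taggedPatterns, List.foldl_append, foldl_tagged_segment]
  rw [any_swap trackingPatterns, any_swap optPatterns, any_swap withdrawalPatterns,
      any_swap granularPatterns] at *
  rw [cascade_eq_table]
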